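-- pv_equiv track=rewrite | github.com/OriolPortaTovar/app_overlap | utils/data_processor.py | actualize_family
-- ===== SOURCE A (Python) =====
-- from typing import Any, Dict, List, Union, Tuple
--
-- def actualize_family(dict_vars: Dict[str, Any], family: List[str]) -> Dict[str, Any]:
--     mapping = {
--         "Mother": "CONVIVEN.1",
--         "Father": "CONVIVEN.2",
--         "Mother's Partner": "CONVIVEN.3",
--         "Father's Partner": "CONVIVEN.4",
--         "Siblings/Stepsiblings": "CONVIVEN.5",
--         "Aunt/Oncle": "CONVIVEN.6",
--         "Grandparents": "CONVIVEN.6",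
--         "Center": "CONVIVEN.6",
--     }
--     for member, key in mapping.items():
--         if member in family:
--             dict_vars[key] = 1
--     return dict_vars
-- ===== SOURCE B (Python) =====
-- def actualize_family(dict_vars, family):
--     mapping = {
--         "Mother": "CONVIVEN.1",
--         "Father": "CONVIVEN.2",
--         "Mother's Partner": "CONVIVEN.3",
--         "Father's Partner": "CONVIVEN.4",
--         "Siblings/Stepsiblings": "CONVIVEN.5",
--         "Aunt/Oncle": "CONVIVEN.6",
--         "Grandparents": "CONVIVEN.6",
--         "Center": "CONVIVEN.6",
--     }
--     # one pass over the actual input: collect the CONVIVEN keys present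
--     present = set()
--     for m in family:
--         k = mapping.get(m)
--         if k is not None:
--             present.add(k)
--     # write the flags in the canonical key order (same order A produces)
--     for key in ("CONVIVEN.1", "CONVIVEN.2", "CONVIVEN.3",
--                 "CONVIVEN.4", "CONVIVEN.5", "CONVIVEN.6"):
--         if key in present:
--             dict_vars[key] = 1
--     return dict_vars
-- ===== Notes on version B (the rewrite author's own statement) =====
-- stated objective: alternative
-- what changed: Instead of scanning the family list once per mapping entry (8 list scans), B makes a single pass over family collecting the present CONVIVEN keys into a set via dict lookup, then writes the flags in the fixed key order; same mutation of dict_vars, same result.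
import Mathlib
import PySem

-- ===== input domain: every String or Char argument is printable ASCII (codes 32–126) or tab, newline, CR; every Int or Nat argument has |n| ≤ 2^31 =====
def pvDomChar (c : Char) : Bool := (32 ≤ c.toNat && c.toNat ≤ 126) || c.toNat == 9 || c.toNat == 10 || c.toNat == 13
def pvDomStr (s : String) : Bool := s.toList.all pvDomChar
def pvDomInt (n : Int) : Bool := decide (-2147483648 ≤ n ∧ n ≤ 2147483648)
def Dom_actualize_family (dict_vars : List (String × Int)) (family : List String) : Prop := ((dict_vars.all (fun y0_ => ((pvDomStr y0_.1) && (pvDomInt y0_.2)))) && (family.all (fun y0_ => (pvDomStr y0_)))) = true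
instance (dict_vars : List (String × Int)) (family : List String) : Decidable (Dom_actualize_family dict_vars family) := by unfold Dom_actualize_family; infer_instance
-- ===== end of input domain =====

-- B makes one pass over `family` collecting present CONVIVEN keys into a set, then writes the
-- flags in canonical key order, instead of A's eight list scans; return value proved equal
-- (both Pythons also mutate dict_vars identically in place).


-- ===== PORT A =====
-- the dict literal both Pythons start from (8 entries, distinct keys)
def famMapping : PySem.Dict String String := PySem.Dict.ofList
  [("Mother", "CONVIVEN.1"), ("Father", "CONVIVEN.2"),
   ("Mother's Partner", "CONVIVEN.3"), ("Father's Partner", "CONVIVEN.4"),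
   ("Siblings/Stepsiblings", "CONVIVEN.5"), ("Aunt/Oncle", "CONVIVEN.6"),
   ("Grandparents", "CONVIVEN.6"), ("Center", "CONVIVEN.6")]

def actualize_family (dict_vars : List (String × Int)) (family : List String) : List (String × Int) :=
  (famMapping.items.foldl
      (fun d p => if p.1 ∈ family then d.insert p.2 1 else d)
      (PySem.Dict.mk dict_vars)).items

-- ===== PORT B =====
-- `present = set()` built by one pass over family (Source B's first loop)
def altPresent (family : List String) : PySem.Set String :=
  family.foldl
    (fun s m => match famMapping.get? m with
      | some k => PySem.Set.add s k
      | none => s)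
    PySem.Set.empty

def actualize_family_alt (dict_vars : List (String × Int)) (family : List String) : List (String × Int) :=
  let present := altPresent family
  (["CONVIVEN.1", "CONVIVEN.2", "CONVIVEN.3", "CONVIVEN.4", "CONVIVEN.5", "CONVIVEN.6"].foldl
      (fun d key => if key ∈ present then d.insert key 1 else d)
      (PySem.Dict.mk dict_vars)).items

-- ===== PRECONDITION & SPEC =====
def Spec_actualize_family (dict_vars : List (String × Int)) (family : List String) (out : List (String × Int)) : Prop := out = actualize_family_alt dict_vars family
instance (dict_vars : List (String × Int)) (family : List String) (out : List (String × Int)) : Decidable (Spec_actualize_family dict_vars family out) := by unfold Spec_actualize_family; infer_instance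

-- ===== CLAIM (what is proved, stated in full; the proofs are below) =====
def Claim_equal_actualize_family : Prop := ∀ (dict_vars : List (String × Int)) (family : List String), Dom_actualize_family dict_vars family → Spec_actualize_family dict_vars family (actualize_family dict_vars family)

-- ===== LEMMAS AND PROOFS =====

lemma mem_altPresent_aux (fam : List String) (s : PySem.Set String) (k : String) :
    (k ∈ fam.foldl
      (fun s m => match famMapping.get? m with
        | some k => PySem.Set.add s k
        | none => s) s) ↔ k ∈ s ∨ ∃ m ∈ fam, famMapping.get? m = some k := by
  induction fam generalizing s with
  | nil => simp
  | cons m fam ih =>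
    simp only [List.foldl_cons]
    cases h : famMapping.get? m with
    | none =>
      rw [ih]
      constructor
      · rintro (hk | ⟨m', hm', hg⟩)
        · exact Or.inl hk
        · exact Or.inr ⟨m', by simp [hm'], hg⟩
      · rintro (hk | ⟨m', hm', hg⟩)
        · exact Or.inl hk
        · rcases List.mem_cons.mp hm' with rfl | hm''
          · rw [h] at hg; cases hg
          · exact Or.inr ⟨m', hm'', hg⟩
    | some k' =>
      rw [ih, PySem.Set.mem_add]
      constructor
      · rintro ((hk | hk') | ⟨m', hm', hg⟩)
        · exact Or.inl hk
        · subst hk'; exact Or.inr ⟨m, by simp, h⟩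
        · exact Or.inr ⟨m', by simp [hm'], hg⟩
      · rintro (hk | ⟨m', hm', hg⟩)
        · exact Or.inl (Or.inl hk)
        · rcases List.mem_cons.mp hm' with rfl | hm''
          · have hkk := h.symm.trans hg
            exact Or.inl (Or.inr (Option.some_inj.mp hkk).symm)
          · exact Or.inr ⟨m', hm'', hg⟩

lemma mem_altPresent (fam : List String) (k : String) :
    k ∈ altPresent fam ↔ ∃ m ∈ fam, famMapping.get? m = some k := by
  unfold altPresent
  rw [mem_altPresent_aux]
  simp [PySem.Set.empty]

lemma famMapping_items : famMapping.items =
  [("Mother", "CONVIVEN.1"), ("Father", "CONVIVEN.2"),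
   ("Mother's Partner", "CONVIVEN.3"), ("Father's Partner", "CONVIVEN.4"),
   ("Siblings/Stepsiblings", "CONVIVEN.5"), ("Aunt/Oncle", "CONVIVEN.6"),
   ("Grandparents", "CONVIVEN.6"), ("Center", "CONVIVEN.6")] := by decide

lemma present1 (fam : List String) : ("CONVIVEN.1" ∈ altPresent fam) ↔ "Mother" ∈ fam := by
  rw [mem_altPresent]
  constructor
  · rintro ⟨m, hm, hg⟩
    have hmem := PySem.Dict.mem_items_of_get?_eq_some _ hg
    rw [famMapping_items] at hmem
    simp [Prod.mk.injEq] at hmem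
    subst hmem; exact hm
  · intro h; exact ⟨"Mother", h, by decide⟩

lemma present2 (fam : List String) : ("CONVIVEN.2" ∈ altPresent fam) ↔ "Father" ∈ fam := by
  rw [mem_altPresent]
  constructor
  · rintro ⟨m, hm, hg⟩
    have hmem := PySem.Dict.mem_items_of_get?_eq_some _ hg
    rw [famMapping_items] at hmem
    simp [Prod.mk.injEq] at hmem
    subst hmem; exact hm
  · intro h; exact ⟨"Father", h, by decide⟩

lemma present3 (fam : List String) : ("CONVIVEN.3" ∈ altPresent fam) ↔ "Mother's Partner" ∈ fam := by
  rw [mem_altPresent]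
  constructor
  · rintro ⟨m, hm, hg⟩
    have hmem := PySem.Dict.mem_items_of_get?_eq_some _ hg
    rw [famMapping_items] at hmem
    simp [Prod.mk.injEq] at hmem
    subst hmem; exact hm
  · intro h; exact ⟨"Mother's Partner", h, by decide⟩

lemma present4 (fam : List String) : ("CONVIVEN.4" ∈ altPresent fam) ↔ "Father's Partner" ∈ fam := by
  rw [mem_altPresent]
  constructor
  · rintro ⟨m, hm, hg⟩
    have hmem := PySem.Dict.mem_items_of_get?_eq_some _ hg
    rw [famMapping_items] at hmem
    simp [Prod.mk.injEq] at hmem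
    subst hmem; exact hm
  · intro h; exact ⟨"Father's Partner", h, by decide⟩

lemma present5 (fam : List String) : ("CONVIVEN.5" ∈ altPresent fam) ↔ "Siblings/Stepsiblings" ∈ fam := by
  rw [mem_altPresent]
  constructor
  · rintro ⟨m, hm, hg⟩
    have hmem := PySem.Dict.mem_items_of_get?_eq_some _ hg
    rw [famMapping_items] at hmem
    simp [Prod.mk.injEq] at hmem
    subst hmem; exact hm
  · intro h; exact ⟨"Siblings/Stepsiblings", h, by decide⟩

lemma present6 (fam : List String) : ("CONVIVEN.6" ∈ altPresent fam) ↔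
    ("Aunt/Oncle" ∈ fam ∨ "Grandparents" ∈ fam ∨ "Center" ∈ fam) := by
  rw [mem_altPresent]
  constructor
  · rintro ⟨m, hm, hg⟩
    have hmem := PySem.Dict.mem_items_of_get?_eq_some _ hg
    rw [famMapping_items] at hmem
    simp [Prod.mk.injEq] at hmem
    rcases hmem with rfl | rfl | rfl
    · exact Or.inl hm
    · exact Or.inr (Or.inl hm)
    · exact Or.inr (Or.inr hm)
  · rintro (h | h | h)
    · exact ⟨"Aunt/Oncle", h, by decide⟩
    · exact ⟨"Grandparents", h, by decide⟩
    · exact ⟨"Center", h, by decide⟩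

-- A's three conditional inserts of "CONVIVEN.6" collapse to B's single test of the disjunction
lemma tri_insert (d : PySem.Dict String Int) (a g c : Prop)
    [Decidable a] [Decidable g] [Decidable c] (k : String) :
    (if c then (if g then (if a then d.insert k 1 else d).insert k 1
                 else (if a then d.insert k 1 else d)).insert k 1
     else (if g then (if a then d.insert k 1 else d).insert k 1
           else (if a then d.insert k 1 else d))) =
    (if a ∨ g ∨ c then d.insert k 1 else d) := by
  split_ifs <;> simp_all [PySem.Dict.insert_insert_self]

-- ===== VERDICT (by name: the statement is the Claim_ definition above) =====
theorem actualize_family_spec : Claim_equal_actualize_family := by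
  intro dict_vars family _
  unfold Spec_actualize_family
  simp only [actualize_family, actualize_family_alt, famMapping_items,
    List.foldl_cons, List.foldl_nil,
    present1 family, present2 family, present3 family,
    present4 family, present5 family, present6 family]
  rw [tri_insert]
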